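-- pv_equiv track=rewrite | github.com/shunyeka-spl/autobotAI-integrations | autobotAI_integrations/utils/__init__.py | filter_stacktrace
-- ===== SOURCE A (Python) =====
-- def filter_stacktrace(stacktrace, start_path="/tmp/mods"):
--     # Split the stack trace into lines
--     stacktrace_lines = stacktrace.split("\n")
--
--     # Initialize a flag to indicate when to start collecting lines
--     collect_lines = False
--     filtered_lines = []
--
--     for line in stacktrace_lines:
--         if start_path in line:
--             collect_lines = True
--         if collect_lines:
--             filtered_lines.append(line)
--
--     return "\n".join(filtered_lines)
-- ===== SOURCE B (Python) =====
-- def filter_stacktrace(stacktrace, start_path="/tmp/mods"):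
--     lines = stacktrace.split("\n")
--     idx = next((i for i, l in enumerate(lines) if start_path in l), None)
--     if idx is None:
--         return ""
--     return "\n".join(lines[idx:])
-- ===== Notes on version B (the rewrite author's own statement) =====
-- stated objective: simpler
-- what changed: B locates the first matching line's index and joins the tail slice, replacing A's collect-flag scan with conditional appends.
import Mathlib
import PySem

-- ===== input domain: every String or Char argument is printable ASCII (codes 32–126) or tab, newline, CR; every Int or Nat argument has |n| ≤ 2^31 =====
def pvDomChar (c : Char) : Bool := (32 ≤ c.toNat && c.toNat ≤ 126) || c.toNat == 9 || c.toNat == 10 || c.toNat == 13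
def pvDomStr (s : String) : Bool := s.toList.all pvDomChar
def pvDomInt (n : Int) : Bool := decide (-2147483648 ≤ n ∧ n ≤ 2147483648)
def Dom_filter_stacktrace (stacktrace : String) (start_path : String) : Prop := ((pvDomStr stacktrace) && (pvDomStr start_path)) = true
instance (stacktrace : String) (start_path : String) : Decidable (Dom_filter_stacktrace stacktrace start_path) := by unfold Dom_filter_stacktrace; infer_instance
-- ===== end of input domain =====

-- B computes the index of the first line containing start_path and joins the tail slice,
-- instead of A's collect-flag scan with conditional appends (objective: simpler).


-- ===== PORT A =====
-- step of A's loop: update the collect flag, then append the line if collecting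
def fsA_step (start_path : String) (st : Bool × List String) (line : String) : Bool × List String :=
  let collect := if PySem.Str.isIn start_path line then true else st.1
  (collect, if collect then st.2 ++ [line] else st.2)

def filter_stacktrace (stacktrace : String) (start_path : String) : String :=
  let stacktrace_lines := (PySem.Str.split? stacktrace "\n").getD []
  let r := stacktrace_lines.foldl (fsA_step start_path) (false, [])
  PySem.Str.join "\n" r.2

-- ===== PORT B =====
def filter_stacktrace_alt (stacktrace : String) (start_path : String) : String :=
  let lines := (PySem.Str.split? stacktrace "\n").getD []
  match lines.findIdx? (fun l => PySem.Str.isIn start_path l) with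
  | none => ""
  | some i => PySem.Str.join "\n" (lines.drop i)

-- ===== PRECONDITION & SPEC =====
def Spec_filter_stacktrace (stacktrace : String) (start_path : String) (out : String) : Prop := out = filter_stacktrace_alt stacktrace start_path
instance (stacktrace : String) (start_path : String) (out : String) : Decidable (Spec_filter_stacktrace stacktrace start_path out) := by unfold Spec_filter_stacktrace; infer_instance

-- ===== CLAIM (what is proved, stated in full; the proofs are below) =====
def Claim_equal_filter_stacktrace : Prop := ∀ (stacktrace : String) (start_path : String), Dom_filter_stacktrace stacktrace start_path → Spec_filter_stacktrace stacktrace start_path (filter_stacktrace stacktrace start_path)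

-- ===== LEMMAS AND PROOFS =====

-- once the flag is true, every remaining line is appended
theorem fsA_foldl_true (start_path : String) (ls : List String) (acc : List String) :
    ls.foldl (fsA_step start_path) (true, acc) = (true, acc ++ ls) := by
  induction ls generalizing acc with
  | nil => simp
  | cons l rest ih =>
      simp only [List.foldl_cons, fsA_step]
      split <;> simp [ih]

-- with the flag false, the collected lines are exactly the tail from the first match
theorem fsA_foldl_false (start_path : String) (ls : List String) (acc : List String) :
    (ls.foldl (fsA_step start_path) (false, acc)).2
      = acc ++ (match ls.findIdx? (fun l => PySem.Str.isIn start_path l) with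
                | none => []
                | some i => ls.drop i) := by
  induction ls generalizing acc with
  | nil => simp
  | cons l rest ih =>
      simp only [List.foldl_cons, fsA_step, List.findIdx?_cons]
      cases hb : PySem.Str.isIn start_path l with
      | true =>
          simp [fsA_foldl_true]
      | false =>
          simp only [Bool.false_eq_true, reduceIte]
          rw [ih]
          cases hr : rest.findIdx? (fun l => PySem.Str.isIn start_path l) <;>
            simp [hr]

-- ===== VERDICT (by name: the statement is the Claim_ definition above) =====
theorem filter_stacktrace_spec : Claim_equal_filter_stacktrace := by
  intro stacktrace start_path _
  unfold Spec_filter_stacktrace filter_stacktrace filter_stacktrace_alt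
  simp only [fsA_foldl_false, List.nil_append]
  cases h : ((PySem.Str.split? stacktrace "\n").getD []).findIdx?
      (fun l => PySem.Str.isIn start_path l) <;> simp [PySem.Str.join]
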